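-- pv_equiv track=rewrite | github.com/Benjamin7991/My-Code-Wars-Solutions | 6KYU/More_Zeros_than_Ones.py | more_zeros
-- ===== SOURCE A (Python) =====
-- def more_zeros(s):
--     binary =  [format(ord(x), 'b') for x in s]
--
--     result = []
--     final_answer= []
--
--     for number in binary:
--         ones = number.count('1')
--         zeros = number.count('0')
--         ans = zeros - ones
--         result.append(ans)
--
--     d = dict(zip(s, result))
--
--     for k,v in d.items():
--         if v > 0:
--             final_answer.append(k)
--     return final_answer
-- ===== SOURCE B (Python) =====
-- def more_zeros(s):
--     out = []
--     for i, ch in enumerate(s):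
--         if ch in s[:i]:
--             continue
--         n = ord(ch)
--         ones = 0
--         length = 0
--         while n:
--             ones += n % 2
--             n //= 2
--             length += 1
--         if 2 * ones < length:
--             out.append(ch)
--     return out
-- ===== Notes on version B (the rewrite author's own statement) =====
-- stated objective: alternative
-- what changed: Replaces A's staged pipeline (binary-string list, score list, dict(zip) dedup, filter pass) with a positional loop that deduplicates by testing membership in the prefix slice s[:i] and decides the keep condition by an arithmetic bit-counting while loop (2*popcount < bit_length) instead of counting characters of the formatted binary string.
import Mathlib
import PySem

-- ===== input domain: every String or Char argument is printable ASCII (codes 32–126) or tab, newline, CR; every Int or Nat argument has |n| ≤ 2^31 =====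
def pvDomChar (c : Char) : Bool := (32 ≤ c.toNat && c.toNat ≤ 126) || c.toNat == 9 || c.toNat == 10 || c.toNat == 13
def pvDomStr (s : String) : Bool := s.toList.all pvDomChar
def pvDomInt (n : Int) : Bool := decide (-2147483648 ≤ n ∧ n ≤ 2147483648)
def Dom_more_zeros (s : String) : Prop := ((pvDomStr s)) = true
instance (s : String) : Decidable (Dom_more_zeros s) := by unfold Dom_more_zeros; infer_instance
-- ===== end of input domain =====

-- B replaces A's staged pipeline (binary-string list, score list, dict(zip) dedup, filter) with a
-- positional loop: dedup by membership in the prefix slice s[:i], keep-condition by an arithmetic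
-- bit-counting while loop; same return value, objective: alternative.


-- ===== PORT A =====
def more_zeros (s : String) : List String :=
  let binary : List String := s.toList.map (fun x => PySem.Int.toBin (x.toNat : Int))
  let result : List Int := binary.foldl (fun r number =>
      let ones : Int := (PySem.Str.count number "1" : Int)
      let zeros : Int := (PySem.Str.count number "0" : Int)
      let ans := zeros - ones
      r ++ [ans]) []
  let d : PySem.Dict Char Int := PySem.Dict.ofList (s.toList.zip result)
  d.items.foldl (fun fa kv => if 0 < kv.2 then fa ++ [String.ofList [kv.1]] else fa) []

-- ===== PORT B =====
-- the while loop 'while n: ones += n % 2; n //= 2; length += 1' (n = ord(ch) ≥ 0, so Nat);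
-- fuel = initial n, always sufficient since n at least halves each iteration
def pvBitsGo : Nat → Nat → Nat → Nat → Nat × Nat
  | 0, _, ones, len => (ones, len)
  | fuel+1, n, ones, len =>
    if n = 0 then (ones, len)
    else pvBitsGo fuel (n / 2) (ones + n % 2) (len + 1)

def pvBits (n : Nat) : Nat × Nat := pvBitsGo n n 0 0

-- 'ch in s[:i]' for the single character ch = membership in the prefix slice (exact: ch has length 1)
def more_zeros_alt (s : String) : List String :=
  (PySem.List.enumerate s.toList).foldl (fun out p =>
    if p.2 ∈ PySem.List.slice s.toList none (some p.1) then out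
    else
      let q := pvBits p.2.toNat
      if 2 * q.1 < q.2 then out ++ [String.ofList [p.2]] else out) []

-- ===== PRECONDITION & SPEC =====
def Spec_more_zeros (s : String) (out : List String) : Prop := out = more_zeros_alt s
instance (s : String) (out : List String) : Decidable (Spec_more_zeros s out) := by unfold Spec_more_zeros; infer_instance

-- ===== CLAIM (what is proved, stated in full; the proofs are below) =====
def Claim_equal_more_zeros : Prop := ∀ (s : String), Dom_more_zeros s → Spec_more_zeros s (more_zeros s)

-- ===== LEMMAS AND PROOFS =====

-- score of a character: zeros minus ones in its binary representation
def pvG (c : Char) : Int :=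
  (PySem.Str.count (PySem.Int.toBin (c.toNat : Int)) "0" : Int)
    - (PySem.Str.count (PySem.Int.toBin (c.toNat : Int)) "1" : Int)

-- common specification: first-occurrence dedup fused with the positive-score filter
def pvH (seen : List Char) : List Char → List String
  | [] => []
  | c :: cs =>
      if c ∈ seen then pvH seen cs
      else (if 0 < pvG c then [String.ofList [c]] else []) ++ pvH (seen ++ [c]) cs

-- the pairs A's dict holds after inserting l on top of keys `seen`
def pvPairs (seen : List Char) : List Char → List (Char × Int)
  | [] => []
  | c :: cs =>
      if c ∈ seen then pvPairs seen cs
      else (c, pvG c) :: pvPairs (seen ++ [c]) cs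

theorem pv_items_foldl_insert (l : List Char) (d : PySem.Dict Char Int)
    (hd : ∀ p ∈ d.items, p.2 = pvG p.1) :
    (l.foldl (fun d c => d.insert c (pvG c)) d).items = d.items ++ pvPairs d.keys l := by
  induction l generalizing d with
  | nil => simp [pvPairs]
  | cons c cs ih =>
    by_cases hc : d.contains c = true
    · have hmem : c ∈ d.keys := (PySem.Dict.contains_iff_mem_keys d c).mp hc
      have heq : d.insert c (pvG c) = d := by
        apply PySem.Dict.ext
        rw [PySem.Dict.items_insert_of_contains d (pvG c) hc]
        conv_rhs => rw [← List.map_id d.items]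
        apply List.map_congr_left
        intro p hp
        by_cases hpc : p.1 == c
        · have h1 : p.1 = c := by simpa using hpc
          have h2 := hd p hp
          simp [← h1, ← h2]
        · simp [hpc]
      simp only [List.foldl_cons, heq, pvPairs, if_pos hmem]
      exact ih d hd
    · have hc' : d.contains c = false := by simpa using hc
      have hmem : c ∉ d.keys := fun h => by
        simp [(PySem.Dict.contains_iff_mem_keys d c).mpr h] at hc'
      have hitems := PySem.Dict.items_insert_of_not_contains d (pvG c) hc'
      have hkeys := PySem.Dict.keys_insert_of_not_contains d (pvG c) hc'
      have hd' : ∀ p ∈ (d.insert c (pvG c)).items, p.2 = pvG p.1 := by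
        intro p hp
        rw [hitems] at hp
        rcases List.mem_append.mp hp with h | h
        · exact hd p h
        · simp at h; subst h; rfl
      simp only [List.foldl_cons, pvPairs, if_neg hmem]
      rw [ih (d.insert c (pvG c)) hd', hitems, hkeys, List.append_assoc]
      rfl

theorem pv_filter_pairs (l seen : List Char) (acc : List String) :
    (pvPairs seen l).foldl
        (fun fa kv => if 0 < kv.2 then fa ++ [String.ofList [kv.1]] else fa) acc
      = acc ++ pvH seen l := by
  induction l generalizing seen acc with
  | nil => simp [pvPairs, pvH]
  | cons c cs ih =>
    by_cases hm : c ∈ seen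
    · simp only [pvPairs, pvH, if_pos hm]; exact ih seen acc
    · simp only [pvPairs, pvH, if_neg hm, List.foldl_cons]
      by_cases hg : 0 < pvG c
      · simp only [if_pos hg]; rw [ih]; simp
      · simp only [if_neg hg]; rw [ih]; simp

theorem pv_A_eq (s : String) : more_zeros s = pvH [] s.toList := by
  unfold more_zeros
  simp only [PySem.List.foldl_append_singleton_eq_map, List.nil_append, List.map_map]
  have hzip : s.toList.zip (s.toList.map ((fun number =>
        (((PySem.Str.count number "0" : Nat) : Int) - ((PySem.Str.count number "1" : Nat) : Int)))
          ∘ (fun x : Char => PySem.Int.toBin (x.toNat : Int))))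
      = s.toList.map (fun c => (c, pvG c)) := by
    exact Eq.symm (List.map_prod_left_eq_zip (f := pvG) (l := s.toList))
  rw [hzip]
  have hof : PySem.Dict.ofList (s.toList.map (fun c => (c, pvG c)))
      = s.toList.foldl (fun d c => d.insert c (pvG c)) PySem.Dict.empty := by
    show (s.toList.map (fun c => (c, pvG c))).foldl
        (fun d p => d.insert p.1 p.2) PySem.Dict.empty = _
    rw [List.foldl_map]
  rw [hof, pv_items_foldl_insert s.toList PySem.Dict.empty (by
    simp [show (PySem.Dict.empty : PySem.Dict Char Int).items = ([] : List (Char × Int)) from rfl])]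
  simp only [PySem.Dict.keys_empty]
  rw [show (PySem.Dict.empty : PySem.Dict Char Int).items = [] from rfl, List.nil_append,
    pv_filter_pairs, List.nil_append]

-- the bit-counting condition agrees with the binary-string-count condition on the (bounded) domain
set_option maxRecDepth 4000 in
theorem pvCond_small : ∀ m : Fin 127, 1 ≤ m.val →
    ((2 * (pvBits m.val).1 < (pvBits m.val).2) ↔
      (0 < ((PySem.Str.count (PySem.Int.toBin (m.val : Int)) "0" : Int)
            - (PySem.Str.count (PySem.Int.toBin (m.val : Int)) "1" : Int)))) := by
  decide

theorem pvCond_char (c : Char) (hc : pvDomChar c = true) :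
    (2 * (pvBits c.toNat).1 < (pvBits c.toNat).2) ↔ (0 < pvG c) := by
  have hle : c.toNat < 127 ∧ 1 ≤ c.toNat := by
    simp only [pvDomChar, Bool.or_eq_true, Bool.and_eq_true, decide_eq_true_eq, beq_iff_eq] at hc
    omega
  exact pvCond_small ⟨c.toNat, hle.1⟩ hle.2

-- pvH depends on `seen` only through membership
theorem pvH_congr (l : List Char) (s1 s2 : List Char) (h : ∀ x, x ∈ s1 ↔ x ∈ s2) :
    pvH s1 l = pvH s2 l := by
  induction l generalizing s1 s2 with
  | nil => rfl
  | cons c cs ih =>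
    simp only [pvH]
    by_cases hm : c ∈ s1
    · rw [if_pos hm, if_pos ((h c).mp hm)]; exact ih _ _ h
    · rw [if_neg hm, if_neg (fun hx => hm ((h c).mpr hx))]
      rw [ih (s1 ++ [c]) (s2 ++ [c]) (by intro x; simp [h x])]

theorem pvH_seen_dup (pre : List Char) (c : Char) (cs : List Char) (hm : c ∈ pre) :
    pvH (pre ++ [c]) cs = pvH pre cs :=
  pvH_congr cs _ _ (by
    intro x
    simp only [List.mem_append, List.mem_singleton]
    constructor
    · rintro (h | rfl); exacts [h, hm]
    · exact Or.inl)

theorem pv_alt_loop (L : List Char) (tail pre : List Char) (hL : L = pre ++ tail)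
    (hdom : ∀ c ∈ tail, pvDomChar c = true) (out : List String) :
    (PySem.List.enumerate tail (pre.length : Int)).foldl
      (fun out p =>
        if p.2 ∈ PySem.List.slice L none (some p.1) then out
        else
          let q := pvBits p.2.toNat
          if 2 * q.1 < q.2 then out ++ [String.ofList [p.2]] else out) out
      = out ++ pvH pre tail := by
  induction tail generalizing pre out with
  | nil => simp [PySem.List.enumerate, pvH]
  | cons c cs ih =>
    have hdc : pvDomChar c = true := hdom c (List.mem_cons_self)
    have hslice : PySem.List.slice L none (some (pre.length : Int)) = pre := by
      rw [PySem.List.slice_to_natCast, hL, List.take_left]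
    rw [PySem.List.enumerate_cons, List.foldl_cons]
    simp only [hslice]
    by_cases hm : c ∈ pre
    · simp only [pvH, if_pos hm]
      have : ((pre.length : Int) + 1) = ((pre ++ [c]).length : Int) := by simp
      rw [this, ih (pre ++ [c]) (by rw [hL]; simp) (fun x hx => hdom x (by simp [hx])) out]
      -- pvH's seen only enters through membership; c ∈ pre gives the same filter
      rw [pvH_seen_dup pre c cs hm]
    · simp only [pvH, if_neg hm]
      have hlen : ((pre.length : Int) + 1) = ((pre ++ [c]).length : Int) := by simp
      by_cases hcond : 2 * (pvBits c.toNat).1 < (pvBits c.toNat).2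
      · simp only [if_pos hcond, if_pos ((pvCond_char c hdc).mp hcond)]
        rw [hlen, ih (pre ++ [c]) (by rw [hL]; simp) (fun x hx => hdom x (by simp [hx])) _]
        simp
      · simp only [if_neg hcond, if_neg (fun h => hcond ((pvCond_char c hdc).mpr h))]
        rw [hlen, ih (pre ++ [c]) (by rw [hL]; simp) (fun x hx => hdom x (by simp [hx])) out]
        simp

-- ===== VERDICT (by name: the statement is the Claim_ definition above) =====
theorem more_zeros_spec : Claim_equal_more_zeros := by
  intro s hdom
  unfold Spec_more_zeros
  rw [pv_A_eq]
  unfold more_zeros_alt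
  have hd : ∀ c ∈ s.toList, pvDomChar c = true := by
    intro c hc
    exact List.all_eq_true.mp hdom c hc
  have := pv_alt_loop s.toList s.toList [] (by simp) hd []
  simp only [List.length_nil, Nat.cast_zero] at this
  rw [this]
  rfl
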